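-- pv_equiv track=rewrite | github.com/pvfigueroa-edigital/insertaDatos | extractor-azure/main.py | _get_tier_info
-- ===== SOURCE A (Python) =====
-- def _get_tier_info(size_gb, sku_name):
--     sizes = [4, 6, 10, 15, 20, 30, 40, 50, 60, 70, 80]
--     caps = [32, 64, 128, 256, 512, 1024, 2048, 4096, 8192, 16384, 32767]
--     tier_num = 80
--     for i, cap in enumerate(caps):
--         if size_gb <= cap:
--             tier_num = sizes[i]
--             break
--     if "Premium" in sku_name:
--         return f"P{tier_num}", "Premium"
--     elif "StandardSSD" in sku_name:
--         return f"E{tier_num}", "Standard SSD"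
--     else:
--         return f"S{tier_num}", "Standard"
-- ===== SOURCE B (Python) =====
-- def _get_tier_info(size_gb, sku_name):
--     sizes = [4, 6, 10, 15, 20, 30, 40, 50, 60, 70, 80]
--     caps = [32, 64, 128, 256, 512, 1024, 2048, 4096, 8192, 16384, 32767]
--     # binary search for the first cap >= size_gb (bisect_left)
--     lo, hi = 0, len(caps)
--     while lo < hi:
--         mid = (lo + hi) // 2
--         if caps[mid] < size_gb:
--             lo = mid + 1
--         else:
--             hi = mid
--     tier_num = sizes[lo] if lo < len(sizes) else 80
--     if "Premium" in sku_name: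
--         return f"P{tier_num}", "Premium"
--     if "StandardSSD" in sku_name:
--         return f"E{tier_num}", "Standard SSD"
--     return f"S{tier_num}", "Standard"
-- ===== Notes on version B (the rewrite author's own statement) =====
-- stated objective: alternative
-- what changed: Replaces the linear first-match scan over enumerate(caps) with a binary search (bisect_left semantics) over the sorted caps list, then indexes sizes once with an out-of-range default of 80.
import Mathlib
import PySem

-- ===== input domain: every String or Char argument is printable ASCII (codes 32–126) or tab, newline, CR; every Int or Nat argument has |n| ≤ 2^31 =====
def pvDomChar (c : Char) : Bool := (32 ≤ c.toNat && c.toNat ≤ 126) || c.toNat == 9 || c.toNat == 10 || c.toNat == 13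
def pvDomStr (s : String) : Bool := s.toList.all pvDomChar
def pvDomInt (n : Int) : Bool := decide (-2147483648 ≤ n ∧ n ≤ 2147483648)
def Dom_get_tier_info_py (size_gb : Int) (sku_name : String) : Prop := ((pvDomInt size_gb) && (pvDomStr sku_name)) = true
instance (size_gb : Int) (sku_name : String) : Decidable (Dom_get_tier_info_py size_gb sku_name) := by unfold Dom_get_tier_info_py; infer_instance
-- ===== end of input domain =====

-- B replaces A's linear first-match scan over the caps thresholds with a binary search
-- (bisect_left semantics) over the same sorted list; identical outputs, alternative algorithm.

-- ===== PORT A =====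
-- A's 'for i, cap in enumerate(caps): if size_gb <= cap: tier_num = sizes[i]; break' loop;
-- sizes[i] ported with pyGetD (the index i < 11 is always in range for these literal lists)
def pvALoop (size_gb : Int) : List (Int × Int) → Int → Int
  | [], tier => tier
  | (i, cap) :: rest, tier =>
      if size_gb ≤ cap then PySem.List.pyGetD [4, 6, 10, 15, 20, 30, 40, 50, 60, 70, 80] i 0
      else pvALoop size_gb rest tier

def get_tier_info_py (size_gb : Int) (sku_name : String) : String × String :=
  let tier_num := pvALoop size_gb
      (PySem.List.enumerate [32, 64, 128, 256, 512, 1024, 2048, 4096, 8192, 16384, 32767]) 80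
  if PySem.Str.isIn "Premium" sku_name then ("P" ++ PySem.Int.toStr tier_num, "Premium")
  else if PySem.Str.isIn "StandardSSD" sku_name then ("E" ++ PySem.Int.toStr tier_num, "Standard SSD")
  else ("S" ++ PySem.Int.toStr tier_num, "Standard")

-- ===== PORT B =====
-- Source B's 'while lo < hi' binary-search loop; caps[mid] ported with pyGetD
-- (0 ≤ mid < 11 is always in range); Python's (lo+hi)//2 on the nonnegative Nats lo, hi is Nat '/'
def pvBLoop (size_gb : Int) (lo hi : Nat) : Nat :=
  if lo < hi then
    let mid := (lo + hi) / 2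
    if PySem.List.pyGetD [32, 64, 128, 256, 512, 1024, 2048, 4096, 8192, 16384, 32767] (mid : Int) 0 < size_gb
    then pvBLoop size_gb (mid + 1) hi
    else pvBLoop size_gb lo mid
  else lo
termination_by hi - lo
decreasing_by all_goals omega

def get_tier_info_py_alt (size_gb : Int) (sku_name : String) : String × String :=
  let lo := pvBLoop size_gb 0 11
  let tier_num : Int :=
    if lo < 11 then PySem.List.pyGetD [4, 6, 10, 15, 20, 30, 40, 50, 60, 70, 80] (lo : Int) 0 else 80
  if PySem.Str.isIn "Premium" sku_name then ("P" ++ PySem.Int.toStr tier_num, "Premium")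
  else if PySem.Str.isIn "StandardSSD" sku_name then ("E" ++ PySem.Int.toStr tier_num, "Standard SSD")
  else ("S" ++ PySem.Int.toStr tier_num, "Standard")

-- ===== PRECONDITION & SPEC =====
def Spec_get_tier_info_py (size_gb : Int) (sku_name : String) (out : String × String) : Prop := out = get_tier_info_py_alt size_gb sku_name
instance (size_gb : Int) (sku_name : String) (out : String × String) : Decidable (Spec_get_tier_info_py size_gb sku_name out) := by unfold Spec_get_tier_info_py; infer_instance

-- ===== CLAIM (what is proved, stated in full; the proofs are below) =====
def Claim_equal_get_tier_info_py : Prop := ∀ (size_gb : Int) (sku_name : String), Dom_get_tier_info_py size_gb sku_name → Spec_get_tier_info_py size_gb sku_name (get_tier_info_py size_gb sku_name)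

-- ===== LEMMAS AND PROOFS =====

-- caps[j] for a Nat index, as B's loop reads it
def pvCapsGet (j : Nat) : Int :=
  PySem.List.pyGetD [32, 64, 128, 256, 512, 1024, 2048, 4096, 8192, 16384, 32767] (j : Int) 0

lemma pvCaps_mono : ∀ i < 11, ∀ j < 11, i ≤ j → pvCapsGet i ≤ pvCapsGet j := by decide

-- bisect_left invariant for B's binary search: the result r splits [lo,hi) into caps[j] < x (j < r) and x ≤ caps[j] (r ≤ j)
lemma pvBLoop_inv (x : Int) : ∀ (fuel lo hi : Nat), hi - lo ≤ fuel → lo ≤ hi → hi ≤ 11 →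
    lo ≤ pvBLoop x lo hi ∧ pvBLoop x lo hi ≤ hi ∧
    (∀ j, j < pvBLoop x lo hi → lo ≤ j → pvCapsGet j < x) ∧
    (∀ j, pvBLoop x lo hi ≤ j → j < hi → x ≤ pvCapsGet j) := by
  intro fuel
  induction fuel with
  | zero =>
      intro lo hi hf hlh h11
      have : lo = hi := by omega
      subst this
      rw [pvBLoop]
      simp
      constructor <;> intro j h1 h2 <;> omega
  | succ n ih =>
      intro lo hi hf hlh h11
      rw [pvBLoop]
      by_cases hlt : lo < hi
      · simp only [if_pos hlt]
        set mid := (lo + hi) / 2 with hmid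
        have hm1 : lo ≤ mid := by omega
        have hm2 : mid < hi := by omega
        by_cases hc : pvCapsGet mid < x
        · rw [if_pos (show PySem.List.pyGetD [32, 64, 128, 256, 512, 1024, 2048, 4096, 8192, 16384, 32767] ((mid : Nat) : Int) 0 < x from hc)]
          obtain ⟨a1, a2, a3, a4⟩ := ih (mid + 1) hi (by omega) (by omega) h11
          refine ⟨by omega, a2, ?_, a4⟩
          intro j hj hlj
          by_cases hjm : j ≤ mid
          · exact lt_of_le_of_lt (pvCaps_mono j (by omega) mid (by omega) hjm) hc
          · exact a3 j hj (by omega)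
        · rw [if_neg (show ¬ PySem.List.pyGetD [32, 64, 128, 256, 512, 1024, 2048, 4096, 8192, 16384, 32767] ((mid : Nat) : Int) 0 < x from hc)]
          obtain ⟨a1, a2, a3, a4⟩ := ih lo mid (by omega) (by omega) (by omega)
          refine ⟨a1, by omega, a3, ?_⟩
          intro j hj hjh
          by_cases hjm : mid ≤ j
          · exact le_trans (not_lt.mp hc) (pvCaps_mono mid (by omega) j (by omega) hjm)
          · exact a4 j hj (by omega)
      · simp only [if_neg hlt]
        have : lo = hi := by omega
        constructor
        · omega
        constructor
        · omega
        constructor <;> intro j h1 h2 <;> omega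

-- A's first-match scan written out as the explicit threshold case split
lemma pvALoop_eq (x : Int) :
    pvALoop x (PySem.List.enumerate [32, 64, 128, 256, 512, 1024, 2048, 4096, 8192, 16384, 32767]) 80
      = (if x ≤ 32 then 4 else if x ≤ 64 then 6 else if x ≤ 128 then 10
        else if x ≤ 256 then 15 else if x ≤ 512 then 20 else if x ≤ 1024 then 30
        else if x ≤ 2048 then 40 else if x ≤ 4096 then 50 else if x ≤ 8192 then 60
        else if x ≤ 16384 then 70 else if x ≤ 32767 then 80 else 80) := by
  rw [show PySem.List.enumerate [(32:Int), 64, 128, 256, 512, 1024, 2048, 4096, 8192, 16384, 32767]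
      = [((0:Int),(32:Int)),(1,64),(2,128),(3,256),(4,512),(5,1024),(6,2048),(7,4096),(8,8192),(9,16384),(10,32767)] from by decide]
  simp only [pvALoop]
  rw [show PySem.List.pyGetD [(4:Int), 6, 10, 15, 20, 30, 40, 50, 60, 70, 80] 0 0 = 4 from by decide,
      show PySem.List.pyGetD [(4:Int), 6, 10, 15, 20, 30, 40, 50, 60, 70, 80] 1 0 = 6 from by decide,
      show PySem.List.pyGetD [(4:Int), 6, 10, 15, 20, 30, 40, 50, 60, 70, 80] 2 0 = 10 from by decide,
      show PySem.List.pyGetD [(4:Int), 6, 10, 15, 20, 30, 40, 50, 60, 70, 80] 3 0 = 15 from by decide,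
      show PySem.List.pyGetD [(4:Int), 6, 10, 15, 20, 30, 40, 50, 60, 70, 80] 4 0 = 20 from by decide,
      show PySem.List.pyGetD [(4:Int), 6, 10, 15, 20, 30, 40, 50, 60, 70, 80] 5 0 = 30 from by decide,
      show PySem.List.pyGetD [(4:Int), 6, 10, 15, 20, 30, 40, 50, 60, 70, 80] 6 0 = 40 from by decide,
      show PySem.List.pyGetD [(4:Int), 6, 10, 15, 20, 30, 40, 50, 60, 70, 80] 7 0 = 50 from by decide,
      show PySem.List.pyGetD [(4:Int), 6, 10, 15, 20, 30, 40, 50, 60, 70, 80] 8 0 = 60 from by decide,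
      show PySem.List.pyGetD [(4:Int), 6, 10, 15, 20, 30, 40, 50, 60, 70, 80] 9 0 = 70 from by decide,
      show PySem.List.pyGetD [(4:Int), 6, 10, 15, 20, 30, 40, 50, 60, 70, 80] 10 0 = 80 from by decide]

-- the two searches select the same tier number for every size
set_option maxHeartbeats 1600000 in
theorem pv_tier_eq (x : Int) :
    pvALoop x (PySem.List.enumerate [32, 64, 128, 256, 512, 1024, 2048, 4096, 8192, 16384, 32767]) 80
      = (if pvBLoop x 0 11 < 11
         then PySem.List.pyGetD [4, 6, 10, 15, 20, 30, 40, 50, 60, 70, 80] ((pvBLoop x 0 11 : Nat) : Int) 0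
         else 80) := by
  obtain ⟨-, hr, h1, h2⟩ := pvBLoop_inv x 11 0 11 (by omega) (by omega) (by omega)
  have F : ∀ j, j < 11 → (j < pvBLoop x 0 11 → pvCapsGet j < x) ∧ (pvBLoop x 0 11 ≤ j → x ≤ pvCapsGet j) :=
    fun j hj => ⟨fun h => h1 j h (by omega), fun h => h2 j h hj⟩
  have g0 := F 0 (by norm_num); have g1 := F 1 (by norm_num); have g2 := F 2 (by norm_num)
  have g3 := F 3 (by norm_num); have g4 := F 4 (by norm_num); have g5 := F 5 (by norm_num)
  have g6 := F 6 (by norm_num); have g7 := F 7 (by norm_num); have g8 := F 8 (by norm_num)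
  have g9 := F 9 (by norm_num); have g10 := F 10 (by norm_num)
  have c0 : pvCapsGet 0 = 32 := by decide
  have c1 : pvCapsGet 1 = 64 := by decide
  have c2 : pvCapsGet 2 = 128 := by decide
  have c3 : pvCapsGet 3 = 256 := by decide
  have c4 : pvCapsGet 4 = 512 := by decide
  have c5 : pvCapsGet 5 = 1024 := by decide
  have c6 : pvCapsGet 6 = 2048 := by decide
  have c7 : pvCapsGet 7 = 4096 := by decide
  have c8 : pvCapsGet 8 = 8192 := by decide
  have c9 : pvCapsGet 9 = 16384 := by decide
  have c10 : pvCapsGet 10 = 32767 := by decide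
  simp only [c0, c1, c2, c3, c4, c5, c6, c7, c8, c9, c10] at g0 g1 g2 g3 g4 g5 g6 g7 g8 g9 g10
  have s0 : PySem.List.pyGetD [(4:Int), 6, 10, 15, 20, 30, 40, 50, 60, 70, 80] (0:Int) 0 = 4 := by decide
  have s1 : PySem.List.pyGetD [(4:Int), 6, 10, 15, 20, 30, 40, 50, 60, 70, 80] (1:Int) 0 = 6 := by decide
  have s2 : PySem.List.pyGetD [(4:Int), 6, 10, 15, 20, 30, 40, 50, 60, 70, 80] (2:Int) 0 = 10 := by decide
  have s3 : PySem.List.pyGetD [(4:Int), 6, 10, 15, 20, 30, 40, 50, 60, 70, 80] (3:Int) 0 = 15 := by decide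
  have s4 : PySem.List.pyGetD [(4:Int), 6, 10, 15, 20, 30, 40, 50, 60, 70, 80] (4:Int) 0 = 20 := by decide
  have s5 : PySem.List.pyGetD [(4:Int), 6, 10, 15, 20, 30, 40, 50, 60, 70, 80] (5:Int) 0 = 30 := by decide
  have s6 : PySem.List.pyGetD [(4:Int), 6, 10, 15, 20, 30, 40, 50, 60, 70, 80] (6:Int) 0 = 40 := by decide
  have s7 : PySem.List.pyGetD [(4:Int), 6, 10, 15, 20, 30, 40, 50, 60, 70, 80] (7:Int) 0 = 50 := by decide
  have s8 : PySem.List.pyGetD [(4:Int), 6, 10, 15, 20, 30, 40, 50, 60, 70, 80] (8:Int) 0 = 60 := by decide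
  have s9 : PySem.List.pyGetD [(4:Int), 6, 10, 15, 20, 30, 40, 50, 60, 70, 80] (9:Int) 0 = 70 := by decide
  have s10 : PySem.List.pyGetD [(4:Int), 6, 10, 15, 20, 30, 40, 50, 60, 70, 80] (10:Int) 0 = 80 := by decide
  rw [pvALoop_eq]
  generalize hgen : pvBLoop x 0 11 = r at hr g0 g1 g2 g3 g4 g5 g6 g7 g8 g9 g10 ⊢
  clear F h1 h2 hgen
  interval_cases r <;>
    · norm_num [s0, s1, s2, s3, s4, s5, s6, s7, s8, s9, s10] at g0 g1 g2 g3 g4 g5 g6 g7 g8 g9 g10 ⊢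
      split_ifs <;> omega

-- ===== VERDICT (by name: the statement is the Claim_ definition above) =====
theorem get_tier_info_py_spec : Claim_equal_get_tier_info_py := by
  intro size_gb sku_name _
  unfold Spec_get_tier_info_py get_tier_info_py get_tier_info_py_alt
  rw [pv_tier_eq]
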